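-- pv_equiv track=rewrite | github.com/gomezc08/MemoScholar | backend/src/generate_content/paper_generator.py | _extract_json_from_content
-- ===== SOURCE A (Python) =====
-- def _extract_json_from_content(content):
--     """
--     Extract valid JSON from content that may contain comments or extra text.
--     """
--     # Find the first '{' and the last '}' to extract the JSON object
--     start_idx = content.find('{')
--     if start_idx == -1:
--         return content
--
--     # Find the matching closing brace by counting braces
--     brace_count = 0
--     end_idx = -1
--
--     for i in range(start_idx, len(content)):
--         if content[i] == '{':
--             brace_count += 1
--         elif content[i] == '}':
--             brace_count -= 1
--             if brace_count == 0:
--                 end_idx = i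
--                 break
--
--     if end_idx != -1:
--         json_content = content[start_idx:end_idx + 1]
--         # Remove any JavaScript-style comments (// comments)
--         lines = json_content.split('\n')
--         cleaned_lines = []
--         for line in lines:
--             # Remove // comments but preserve // in strings
--             comment_pos = -1
--             in_string = False
--             escape_next = False
--
--             for i, char in enumerate(line):
--                 if escape_next:
--                     escape_next = False
--                     continue
--                 if char == '\\':
--                     escape_next = True
--                     continue
--                 if char == '"' and not escape_next:
--                     in_string = not in_string
--                     continue
--                 if char == '/' and i + 1 < len(line) and line[i + 1] == '/' and not in_string:
--                     comment_pos = i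
--                     break
--
--             if comment_pos != -1:
--                 line = line[:comment_pos]
--
--             cleaned_lines.append(line)
--
--         return '\n'.join(cleaned_lines)
--
--     return content
-- ===== SOURCE B (Python) =====
-- def _extract_json_from_content(content):
--     """
--     Extract valid JSON from content that may contain comments or extra text.
--     """
--     start = content.find('{')
--     if start == -1:
--         return content
--
--     # find the matching '}' by tracking nesting depth arithmetically
--     depth = 0
--     end = -1
--     for i in range(start, len(content)):
--         ch = content[i]
--         depth += (ch == '{') - (ch == '}')
--         if depth == 0 and ch == '}':
--             end = i
--             break
--
--     if end == -1:
--         return content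
--
--     s = content[start:end + 1]
--     # table-driven state machine over (char, lookahead) pairs; one fold, no line split.
--     NORMAL, INSTR, ESC_N, ESC_S, SKIP = range(5)
--     out = []
--     state = NORMAL
--     for ch, nxt in zip(s, s[1:] + '\x00'):
--         if ch == '\n':
--             out.append(ch)
--             state = NORMAL
--         elif state == SKIP:
--             pass
--         elif state == ESC_N:
--             out.append(ch)
--             state = NORMAL
--         elif state == ESC_S:
--             out.append(ch)
--             state = INSTR
--         elif ch == '\\':
--             out.append(ch)
--             state = ESC_S if state == INSTR else ESC_N
--         elif ch == '"':
--             out.append(ch)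
--             state = NORMAL if state == INSTR else INSTR
--         elif ch == '/' and nxt == '/' and state == NORMAL:
--             state = SKIP
--         else:
--             out.append(ch)
--     return ''.join(out)
-- ===== Notes on version B (the rewrite author's own statement) =====
-- stated objective: alternative
-- what changed: A's newline-split / per-line comment-position rescan / join is replaced by an arithmetic depth counter for the brace match and a single table-driven state-machine fold over (char, lookahead) pairs that strips // comments without splitting lines.
import Mathlib
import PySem

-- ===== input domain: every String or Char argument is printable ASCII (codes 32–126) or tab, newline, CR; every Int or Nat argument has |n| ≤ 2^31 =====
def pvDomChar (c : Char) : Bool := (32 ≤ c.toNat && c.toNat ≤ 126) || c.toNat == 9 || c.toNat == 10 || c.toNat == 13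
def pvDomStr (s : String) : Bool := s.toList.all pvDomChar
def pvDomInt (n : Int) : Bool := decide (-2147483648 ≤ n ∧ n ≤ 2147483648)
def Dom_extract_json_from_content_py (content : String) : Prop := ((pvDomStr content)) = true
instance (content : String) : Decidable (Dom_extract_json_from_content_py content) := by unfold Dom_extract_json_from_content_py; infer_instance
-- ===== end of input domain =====

-- B replaces A's branching brace counter and newline-split / per-line comment-position rescan / join
-- by an arithmetic depth counter and ONE table-driven state-machine fold over (char, lookahead)
-- pairs (objective: alternative decomposition).

-- ===== PORT A =====

-- brace-counting loop 'for i in range(start_idx, len(content))', run over content.drop start_idx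
-- with i the relative index (exact: content[start_idx + i] is the i-th element of the drop)
def pvABrace : List Char → Int → Nat → Option Nat
  | [], _, _ => none
  | c :: rest, bc, i =>
    if c = '{' then pvABrace rest (bc + 1) (i + 1)
    else if c = '}' then
      (if bc - 1 = 0 then some i else pvABrace rest (bc - 1) (i + 1))
    else pvABrace rest bc (i + 1)

-- the inner 'for i, char in enumerate(line)' comment scanner; 'i+1 < len(line) and line[i+1]=="/"'
-- is exactly 'rest.head? = some '/'' at the cons step
def pvAFindComment : List Char → Nat → Bool → Bool → Option Nat
  | [], _, _, _ => none
  | c :: rest, i, inStr, esc =>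
    if esc then pvAFindComment rest (i + 1) inStr false
    else if c = '\\' then pvAFindComment rest (i + 1) inStr true
    else if c = '"' then pvAFindComment rest (i + 1) (!inStr) esc
    else if c = '/' ∧ rest.head? = some '/' ∧ inStr = false then some i
    else pvAFindComment rest (i + 1) inStr esc

def pvACleanLine (line : List Char) : List Char :=
  match pvAFindComment line 0 false false with
  | some p => line.take p        -- line = line[:comment_pos]
  | none => line

def extract_json_from_content_py (content : String) : String :=
  let cs := content.toList
  let f := PySem.Chars.find cs ['{']            -- content.find('{')
  if f = -1 then content
  else
    let start := f.toNat
    match pvABrace (cs.drop start) 0 0 with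
    | none => content                            -- end_idx stays -1
    | some rel =>
      -- json_content = content[start_idx:end_idx+1], end_idx = start + rel
      let json := (cs.drop start).take (rel + 1)
      -- split('\n') with a single-char separator is exactly List.splitOn; '\n'.join is intercalate
      String.ofList (List.intercalate ['\n'] ((json.splitOn '\n').map pvACleanLine))

-- ===== PORT B =====

-- 'depth += (ch == '{') - (ch == '}'); if depth == 0 and ch == '}': end = i; break'
def pvBDepth : List Char → Int → Nat → Option Nat
  | [], _, _ => none
  | c :: rest, d, i =>
    let d' := d + (if c = '{' then 1 else 0) - (if c = '}' then 1 else 0)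
    if d' = 0 ∧ c = '}' then some i else pvBDepth rest d' (i + 1)

-- states: 0 NORMAL, 1 INSTR, 2 ESC_N, 3 ESC_S, 4 SKIP; returns (next state, emit this char?)
def pvBStep (st : Nat) (ch nxt : Char) : Nat × Bool :=
  if ch = '\n' then (0, true)
  else if st = 4 then (4, false)
  else if st = 2 then (0, true)
  else if st = 3 then (1, true)
  else if ch = '\\' then ((if st = 1 then 3 else 2), true)
  else if ch = '"' then ((if st = 1 then 0 else 1), true)
  else if ch = '/' ∧ nxt = '/' ∧ st = 0 then (4, false)
  else (st, true)

def extract_json_from_content_py_alt (content : String) : String :=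
  let cs := content.toList
  let f := PySem.Chars.find cs ['{']            -- content.find('{')
  if f = -1 then content
  else
    let start := f.toNat
    match pvBDepth (cs.drop start) 0 0 with
    | none => content
    | some rel =>
      let s := (cs.drop start).take (rel + 1)   -- content[start:end + 1]
      -- 'for ch, nxt in zip(s, s[1:] + "\x00")', appending to out (kept reversed, as a fold)
      let res := (s.zip (s.drop 1 ++ ['\x00'])).foldl
          (fun (acc : List Char × Nat) p =>
            let r := pvBStep acc.2 p.1 p.2
            (if r.2 then p.1 :: acc.1 else acc.1, r.1)) ([], 0)
      String.ofList res.1.reverse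

-- ===== PRECONDITION & SPEC =====
def Spec_extract_json_from_content_py (content : String) (out : String) : Prop := out = extract_json_from_content_py_alt content
instance (content : String) (out : String) : Decidable (Spec_extract_json_from_content_py content out) := by unfold Spec_extract_json_from_content_py; infer_instance

-- ===== CLAIM (what is proved, stated in full; the proofs are below) =====
def Claim_equal_extract_json_from_content_py : Prop := ∀ (content : String), Dom_extract_json_from_content_py content → Spec_extract_json_from_content_py content (extract_json_from_content_py content)

-- ===== LEMMAS AND PROOFS =====

-- the two brace loops agree
theorem pvBrace_eq (l : List Char) : ∀ bc i, pvBDepth l bc i = pvABrace l bc i := by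
  induction l with
  | nil => intro bc i; rfl
  | cons c rest ih =>
      intro bc i
      simp only [pvBDepth, pvABrace]
      by_cases h1 : c = '{'
      · have : c ≠ '}' := by simp [h1]
        simp [h1, this, ih]
      · by_cases h2 : c = '}'
        · by_cases h3 : bc - 1 = 0 <;> simp [h1, h2, h3, ih] <;> omega
        · simp [h1, h2, ih]

-- structural form of A's per-line cleaner (truncate at the first comment)
def pvClean : List Char → Bool → Bool → List Char
  | [], _, _ => []
  | c :: rest, inStr, esc =>
    if esc then c :: pvClean rest inStr false
    else if c = '\\' then c :: pvClean rest inStr true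
    else if c = '"' then c :: pvClean rest (!inStr) esc
    else if c = '/' ∧ rest.head? = some '/' ∧ inStr = false then []
    else c :: pvClean rest inStr esc

theorem pvAFindComment_shift (l : List Char) : ∀ i inStr esc,
    pvAFindComment l i inStr esc = (pvAFindComment l 0 inStr esc).map (· + i) := by
  induction l with
  | nil => intro i inStr esc; rfl
  | cons c rest ih =>
      intro i inStr esc
      simp only [pvAFindComment]
      split_ifs
      · rw [ih (i + 1), ih 1]; cases pvAFindComment rest 0 inStr false <;> simp <;> omega
      · rw [ih (i + 1), ih 1]; cases pvAFindComment rest 0 inStr true <;> simp <;> omega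
      · rw [ih (i + 1), ih 1]; cases pvAFindComment rest 0 (!inStr) esc <;> simp <;> omega
      · simp
      · rw [ih (i + 1), ih 1]; cases pvAFindComment rest 0 inStr esc <;> simp <;> omega

theorem pvACleanLine_eq_aux (l : List Char) : ∀ inStr esc,
    (match pvAFindComment l 0 inStr esc with
      | some p => l.take p
      | none => l) = pvClean l inStr esc := by
  induction l with
  | nil => intro inStr esc; rfl
  | cons c rest ih =>
      intro inStr esc
      simp only [pvAFindComment, pvClean]
      split_ifs <;>
        first
          | rfl
          | (rw [pvAFindComment_shift rest 1, ← ih]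
             cases pvAFindComment rest 0 _ _ <;> simp)

theorem pvACleanLine_eq (l : List Char) : pvACleanLine l = pvClean l false false := by
  rw [pvACleanLine.eq_def, pvACleanLine_eq_aux]

-- joining a line list with '\n'
theorem intercalate_newline_cons (a : List Char) (t : List (List Char)) :
    List.intercalate ['\n'] (a :: t) = a ++ t.flatMap (fun x => '\n' :: x) := by
  induction t generalizing a with
  | nil => simp [List.intercalate]
  | cons b t ih =>
      simp only [List.intercalate, List.intersperse] at *
      simp [List.flatten] at *
      simp [ih b]

-- the head character of the first line of rest: '\n' can never be it
theorem head_splitOn_head (rest : List Char) :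
    ((rest.splitOn '\n').headI).head? = if rest.head? = some '\n' then none else rest.head? := by
  cases rest with
  | nil => simp [List.splitOn_nil]
  | cons d r2 =>
      by_cases hd : d = '\n'
      · subst hd
        simp [List.splitOn, List.splitOnP_cons]
      · have hsp : (d :: r2).splitOn '\n' = ((r2.splitOn '\n').modifyHead (d :: ·)) := by
          simp [List.splitOn, List.splitOnP_cons, hd]
        rw [hsp]
        obtain ⟨h, t, hht⟩ :=
          List.exists_cons_of_ne_nil (show r2.splitOn '\n' ≠ [] from List.splitOnP_ne_nil _ r2)
        rw [hht]
        simp [hd]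

-- flag-based one-pass stripper: the bridge between B's fold and A's split/clean/join
def pvBGo : List Char → Bool → Bool → Bool → List Char
  | [], _, _, _ => []
  | c :: rest, inStr, esc, skip =>
    if c = '\n' then c :: pvBGo rest false false false
    else if skip then pvBGo rest inStr esc skip
    else if esc then c :: pvBGo rest inStr false skip
    else if c = '\\' then c :: pvBGo rest inStr true skip
    else if c = '"' then c :: pvBGo rest (!inStr) esc skip
    else if c = '/' ∧ inStr = false ∧ rest.head? = some '/' then pvBGo rest inStr esc true
    else c :: pvBGo rest inStr esc skip

-- encoding of the three flags into B's state table
def pvEnc (inStr esc skip : Bool) : Nat :=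
  if skip then 4 else if esc then (if inStr then 3 else 2) else (if inStr then 1 else 0)

theorem pvZipped_cons (c : Char) (rest : List Char) :
    ((c :: rest).zip (((c :: rest).drop 1) ++ ['\x00'])) =
      (c, rest.head?.getD '\x00') :: (rest.zip ((rest.drop 1) ++ ['\x00'])) := by
  cases rest <;> simp

-- B's fold realises pvBGo (accumulator kept reversed)
theorem pvFold_eq_pvBGo (l : List Char) : ∀ (acc : List Char) inStr esc skip,
    ((l.zip ((l.drop 1) ++ ['\x00'])).foldl
        (fun (acc : List Char × Nat) p =>
          let r := pvBStep acc.2 p.1 p.2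
          (if r.2 then p.1 :: acc.1 else acc.1, r.1)) (acc, pvEnc inStr esc skip)).1
      = (pvBGo l inStr esc skip).reverse ++ acc := by
  induction l with
  | nil => intro acc inStr esc skip; simp [pvBGo]
  | cons c rest ih =>
      intro acc inStr esc skip
      rw [pvZipped_cons, List.foldl_cons]
      have hh : (rest.head?.getD '\x00' = '/') ↔ (rest.head? = some '/') := by
        cases hr : rest.head? <;> simp <;> intro h <;> simp [h] <;> decide
      by_cases hn : c = '\n'
      · have : pvBStep (pvEnc inStr esc skip) c (rest.head?.getD '\x00') = (0, true) := by
          simp [pvBStep, hn]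
        rw [this]
        simp only [pvBGo, if_pos hn]
        rw [show (0 : Nat) = pvEnc false false false from rfl, ih]
        simp
      · by_cases hs : skip = true
        · have : pvBStep (pvEnc inStr esc skip) c (rest.head?.getD '\x00') = (4, false) := by
            simp [pvBStep, hn, pvEnc, hs]
          rw [this]
          simp only [pvBGo, if_neg hn, hs, if_pos rfl]
          rw [show (4 : Nat) = pvEnc inStr esc true from by simp [pvEnc], ih]
          simp [hs]
        · have hs' : skip = false := by simpa using hs
          subst hs'
          by_cases he : esc = true
          · have : pvBStep (pvEnc inStr esc false) c (rest.head?.getD '\x00')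
                = (if inStr then 1 else 0, true) := by
              cases inStr <;> simp [pvBStep, hn, pvEnc, he]
            rw [this]
            simp only [pvBGo, if_neg hn, if_neg (by simp : ¬ (false = true)), he, if_pos rfl]
            rw [show (if inStr then 1 else 0) = pvEnc inStr false false from by
              cases inStr <;> simp [pvEnc], ih]
            simp
          · have he' : esc = false := by simpa using he
            subst he'
            by_cases hb : c = '\\'
            · have : pvBStep (pvEnc inStr false false) c (rest.head?.getD '\x00')
                  = (if inStr then 3 else 2, true) := by
                cases inStr <;> simp [pvBStep, hn, pvEnc, hb]
              rw [this]
              simp only [pvBGo, if_neg hn, if_neg (by simp : ¬ (false = true)), if_pos hb]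
              rw [show (if inStr then 3 else 2) = pvEnc inStr true false from by
                cases inStr <;> simp [pvEnc], ih]
              simp
            · by_cases hq : c = '"'
              · have : pvBStep (pvEnc inStr false false) c (rest.head?.getD '\x00')
                    = (if inStr then 0 else 1, true) := by
                  cases inStr <;> simp [pvBStep, hn, pvEnc, hb, hq]
                rw [this]
                simp only [pvBGo, if_neg hn, if_neg (by simp : ¬ (false = true)), if_neg hb,
                  if_pos hq]
                rw [show (if inStr then 0 else 1) = pvEnc (!inStr) false false from by
                  cases inStr <;> simp [pvEnc], ih]
                simp
              · by_cases hcm : c = '/' ∧ inStr = false ∧ rest.head? = some '/'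
                · obtain ⟨hc1, hc2, hc3⟩ := hcm
                  subst hc2
                  have : pvBStep (pvEnc false false false) c (rest.head?.getD '\x00')
                      = (4, false) := by
                    simp [pvBStep, hn, pvEnc, hb, hq, hc1, hh, hc3]
                  rw [this]
                  rw [show (4 : Nat) = pvEnc false false true from by simp [pvEnc], ih]
                  simp [pvBGo, hn, hc1, hc3]
                · have : pvBStep (pvEnc inStr false false) c (rest.head?.getD '\x00')
                      = (pvEnc inStr false false, true) := by
                    cases hIn : inStr
                    · have hne : ¬ (c = '/' ∧ rest.head?.getD '\x00' = '/') := by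
                        intro h
                        have hcm' : ¬ (c = '/' ∧ false = false ∧ rest.head? = some '/') := by
                          rw [hIn] at hcm; exact hcm
                        exact hcm' ⟨h.1, rfl, hh.mp h.2⟩
                      simp [pvBStep, pvEnc, hn, hb, hq, hne]
                    · simp [pvBStep, hn, hb, hq, pvEnc]
                  rw [this]
                  simp only [pvBGo, if_neg hn, if_neg (by simp : ¬ (false = true)), if_neg hb,
                    if_neg hq, if_neg hcm]
                  rw [ih]
                  simp

-- per-line correctness of the flag-based stripper against split / clean / join
theorem pvBGo_splitOn (l : List Char) : ∀ inStr esc,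
    (pvBGo l inStr esc false =
        pvClean ((l.splitOn '\n').headI) inStr esc
          ++ ((l.splitOn '\n').tail.map (fun x => pvClean x false false)).flatMap (fun x => '\n' :: x))
    ∧ (pvBGo l inStr esc true =
        ((l.splitOn '\n').tail.map (fun x => pvClean x false false)).flatMap (fun x => '\n' :: x)) := by
  induction l with
  | nil => intro inStr esc; simp [pvBGo, List.splitOn_nil, pvClean]
  | cons c rest ih =>
      intro inStr esc
      obtain ⟨h, t, hht'⟩ :=
        List.exists_cons_of_ne_nil (show rest.splitOn '\n' ≠ [] from List.splitOnP_ne_nil _ rest)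
      by_cases hc : c = '\n'
      · subst hc
        have hs : (('\n' : Char) :: rest).splitOn '\n' = [] :: rest.splitOn '\n' := by
          simp [List.splitOn, List.splitOnP_cons]
        have hB : ∀ skip, pvBGo ('\n' :: rest) inStr esc skip = '\n' :: pvBGo rest false false false := by
          intro skip; simp [pvBGo]
        constructor <;>
          · rw [hB, (ih false false).1, hht']
            simp [hs, hht', pvClean]
      · have hs : (c :: rest).splitOn '\n' = (rest.splitOn '\n').modifyHead (c :: ·) := by
          simp [List.splitOn, List.splitOnP_cons, hc]
        have hhead : h.head? = if rest.head? = some '\n' then none else rest.head? := by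
          have hh := head_splitOn_head rest
          rw [hht'] at hh; simpa using hh
        have hcond : (c = '/' ∧ h.head? = some '/' ∧ inStr = false)
            ↔ (c = '/' ∧ inStr = false ∧ rest.head? = some '/') := by
          constructor
          · rintro ⟨a, b, d⟩
            refine ⟨a, d, ?_⟩
            rw [hhead] at b
            by_cases hn : rest.head? = some '\n'
            · rw [if_pos hn] at b; exact absurd b (by simp)
            · rw [if_neg hn] at b; exact b
          · rintro ⟨a, b, d⟩
            refine ⟨a, ?_, b⟩
            rw [hhead]
            have hn : ¬ rest.head? = some '\n' := by rw [d]; simp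
            rw [if_neg hn]; exact d
        have hB1 : pvBGo (c :: rest) inStr esc false =
            if esc = true then c :: pvBGo rest inStr false false
            else if c = '\\' then c :: pvBGo rest inStr true false
            else if c = '"' then c :: pvBGo rest (!inStr) esc false
            else if c = '/' ∧ inStr = false ∧ rest.head? = some '/' then pvBGo rest inStr esc true
            else c :: pvBGo rest inStr esc false := by
          simp [pvBGo, hc]
        have hB2 : pvBGo (c :: rest) inStr esc true = pvBGo rest inStr esc true := by
          simp [pvBGo, hc]
        constructor
        · rw [hB1, hs, hht']
          simp only [List.modifyHead, List.headI, List.tail, pvClean, hcond]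
          split_ifs <;>
            first
              | (rw [(ih _ _).1, hht']; simp)
              | (rw [(ih _ _).2, hht']; simp)
        · rw [hB2, (ih inStr esc).2, hht', hs, hht']
          simp [List.modifyHead]

theorem pvBGo_eq_clean_join (l : List Char) :
    pvBGo l false false false =
      List.intercalate ['\n'] ((l.splitOn '\n').map pvACleanLine) := by
  obtain ⟨h, t, hht'⟩ :=
    List.exists_cons_of_ne_nil (show l.splitOn '\n' ≠ [] from List.splitOnP_ne_nil _ l)
  rw [(pvBGo_splitOn l false false).1, hht']
  simp only [List.map_cons, intercalate_newline_cons, List.headI, List.tail, List.flatMap_map]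
  simp [pvACleanLine_eq]

-- ===== VERDICT (by name: the statement is the Claim_ definition above) =====
theorem extract_json_from_content_py_spec : Claim_equal_extract_json_from_content_py := by
  intro content _
  unfold Spec_extract_json_from_content_py
  unfold extract_json_from_content_py extract_json_from_content_py_alt
  simp only [pvBrace_eq]
  split_ifs with hf
  · rfl
  · cases hb : pvABrace (content.toList.drop (PySem.Chars.find content.toList ['{']).toNat) 0 0 with
    | none => simp [hb]
    | some rel =>
      simp only [hb]
      rw [show (0 : Nat) = pvEnc false false false from rfl, pvFold_eq_pvBGo]
      simp [pvBGo_eq_clean_join]
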